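-- pv_equiv track=rewrite | github.com/velia-vito/Cyberpunk-2080 | dotwrap.py | reformatText
-- ===== SOURCE A (Python) =====
-- from typing import List
-- from math import ceil
--
-- def reformatText(text: str, nodeWidth: int, edgeWidth: int, commentWidth: int) -> str:
--     """
--     Split labels into roughly equi-sized lines < maxWidth, and comments < commentWidth
--     """
--
--     # Split input text into lines
--     inLines = text.split("\n")
--     outLines = []
--
--     # Process each line
--     for line in inLines:
--
--         # Remove initial padding (used only for line type identification)
--         sLine = line.strip()
--
--         # If comment, split to commentWidth (note that indent is maintained)
--         if sLine.startswith("// "):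
--             indent, wLine = line.split("// ")
--
--             wSplit = splitLine(wLine, commentWidth - len(indent))
--
--             for each in wSplit:
--                 outLines.append(indent + "// " + each)
--
--         elif sLine.startswith('label = "'):
--             indent, wLine = line.split('label = "')
--             wLine = wLine[:-1]  # remove trailing quote
--
--             # Split the line into roughly equal parts based on nodeWidth
--             wSplit = splitLine(wLine, len(wLine) // (ceil(len(wLine) / nodeWidth)))
--
--             newLine = indent + 'label = "' + wSplit[0]
--             for each in wSplit[1:]:
--                 newLine += "\\n" + each
--
--             outLines.append(newLine + '"')
--
--         elif sLine.startswith("xlabel = "):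
--             indent, wLine = line.split('xlabel = "')
--             wLine = wLine[:-1]  # remove trailing quote
--
--             # Split the line into roughly equal parts based on nodeWidth
--             wSplit = splitLine(wLine, len(wLine) // (ceil(len(wLine) / nodeWidth)))
--
--             newLine = indent + 'xlabel = "' + wSplit[0]
--             for each in wSplit[1:]:
--                 newLine += "\\n" + each
--
--             outLines.append(newLine + '"')
--
--         elif "->" in sLine and '[xlabel = "' in sLine:
--             edge, wLine = line.split('[xlabel = "')
--             wLine = wLine[:-2]  # remove trailing quote and bracket
--
--             # Split the line into parts based on edgeWidth
--             wSplit = splitLine(wLine, edgeWidth)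
--
--             newLine = edge + '[xlabel = "' + wSplit[0]
--             for each in wSplit[1:]:
--                 newLine += "\\n" + each
--
--             outLines.append(newLine + '"]')
--
--         else:
--             outLines.append(line)
--
--     return "\n".join(outLines)
--
-- def splitLine(text: str, width: int) -> List[str]:
--     cText = text
--     sLines = []
--
--     # Split the text into lines of specified width
--     while len(text) > width:
--         splitIndex = findPrevSpace(text, width)
--         sLines.append(text[:splitIndex])
--         text = text[splitIndex + 1 :]
--
--     # If the last line is too short, redistribute the text
--     if len(text) < width // 2 and len(sLines) > 0:
--         sLines = splitLine(cText, width + (len(text) // len(sLines) + 1))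
--     else:
--         sLines.append(text)
--
--     return sLines
--
-- def findPrevSpace(text: str, index: int) -> int:
--     # Find the previous space character before the specified index
--     for i in range(index, 0, -1):
--         if text[i] == " ":
--             return i
--     return -1
-- ===== SOURCE B (Python) =====
-- from math import ceil
--
--
-- def _cutPoints(text, width):
--     # Absolute indices of the spaces where the greedy pass cuts: from each start,
--     # the last space within the next `width` characters (relative index in [1, width]).
--     cuts = []
--     start = 0
--     while len(text) - start > width:
--         rel = -1
--         for i in range(1, min(width + 1, len(text) - start)):
--             if text[start + i] == " ":
--                 rel = i
--         if rel < 0: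
--             break
--         cuts.append(start + rel)
--         start = start + rel + 1
--     return cuts
--
--
-- def splitLine(text, width):
--     # Widen-and-retry over cut INDICES; the pieces are sliced out only once, at the end.
--     while True:
--         cuts = _cutPoints(text, width)
--         remStart = cuts[-1] + 1 if cuts else 0
--         remLen = len(text) - remStart
--         if cuts and remLen < width // 2:
--             width += remLen // len(cuts) + 1
--         else:
--             pieces, start = [], 0
--             for c in cuts:
--                 pieces.append(text[start:c])
--                 start = c + 1
--             pieces.append(text[start:])
--             return pieces
--
--
-- def reformatText(text: str, nodeWidth: int, edgeWidth: int, commentWidth: int) -> str: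
--     out = []
--     for line in text.split("\n"):
--         s = line.strip()
--         if s.startswith("// "):
--             indent, body = line.split("// ")
--             out += [indent + "// " + p for p in splitLine(body, commentWidth - len(indent))]
--             continue
--         # table of (marker, chars trimmed at the end, closing suffix, fixed width or None)
--         if s.startswith('label = "'):
--             spec = ('label = "', 1, '"', None)
--         elif s.startswith("xlabel = "):
--             spec = ('xlabel = "', 1, '"', None)
--         elif "->" in s and '[xlabel = "' in s:
--             spec = ('[xlabel = "', 2, '"]', edgeWidth)
--         else:
--             out.append(line)
--             continue
--         marker, trim, suffix, w = spec
--         head, body = line.split(marker)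
--         body = body[:-trim]
--         if w is None:
--             w = len(body) // ceil(len(body) / nodeWidth)
--         out.append(head + marker + "\\n".join(splitLine(body, w)) + suffix)
--     return "\n".join(out)
-- ===== Notes on version B (the rewrite author's own statement) =====
-- stated objective: alternative
-- what changed: splitLine's restart-recursion over shrinking string slices becomes an iterative widen-and-retry loop that first computes the list of absolute cut INDICES (forward last-space scans) and slices the pieces out only once at the end, and reformatText's four inlined branches become a comment case plus one table-driven generic assembly (marker, trim, suffix, width) shared by the label/xlabel/edge cases.
-- outside the precondition, e.g. on reformatText('// ab cdef', 1, 1, 4): A returns '// ab\n// cdef', B returns '// ab\n// cdef'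
import Mathlib
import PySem

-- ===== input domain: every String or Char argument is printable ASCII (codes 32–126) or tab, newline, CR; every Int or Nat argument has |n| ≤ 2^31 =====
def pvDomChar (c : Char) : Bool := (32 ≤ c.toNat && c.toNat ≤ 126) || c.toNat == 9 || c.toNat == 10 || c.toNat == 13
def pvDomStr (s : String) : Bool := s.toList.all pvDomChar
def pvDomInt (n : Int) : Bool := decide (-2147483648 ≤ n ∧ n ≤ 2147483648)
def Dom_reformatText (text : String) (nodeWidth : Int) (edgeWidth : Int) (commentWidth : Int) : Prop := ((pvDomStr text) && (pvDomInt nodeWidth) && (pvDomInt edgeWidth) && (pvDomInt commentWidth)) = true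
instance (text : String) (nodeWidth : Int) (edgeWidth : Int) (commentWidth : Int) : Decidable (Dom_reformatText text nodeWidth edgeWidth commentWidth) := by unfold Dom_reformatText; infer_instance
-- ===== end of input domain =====

-- B re-decomposes the same wrapping: splitLine's restart-recursion on slices becomes a
-- widen-and-retry loop over a list of cut INDICES (pieces sliced out once at the end), and
-- the three label/xlabel/edge branches collapse into one table-driven generic assembly
-- (objective: alternative, same cost).

-- ===== PORT A =====
-- findPrevSpace: 'for i in range(index, 0, -1): if text[i] == " ": return i; return -1',
-- as a countdown recursion on index.toNat (range(index,0,-1) visits index, …, 1).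
-- text[i] is ported with pyGet?; at every call site index < len(text), where this is exact.
def fpsA (cs : List Char) : Nat → Int
  | 0 => -1
  | n+1 => if PySem.List.pyGet? cs ((n : Int)+1) = some ' ' then ((n : Int)+1) else fpsA cs n

theorem fpsA_nil (n : Nat) : fpsA [] n = -1 := by
  induction n with
  | zero => rfl
  | succ n ih => simp [fpsA, PySem.List.pyGet?, ih]

def findPrevSpaceA (cs : List Char) (index : Int) : Int := fpsA cs index.toNat

theorem whileA_dec (cs : List Char) (width : Int) (hj : 1 ≤ findPrevSpaceA cs width) :
    (PySem.List.slice cs (some (findPrevSpaceA cs width + 1)) none).length < cs.length := by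
  rw [PySem.List.slice_from _ (by omega)]
  have hne : cs ≠ [] := by
    intro hnil
    rw [hnil] at hj; simp [findPrevSpaceA, fpsA_nil] at hj
  have hpos : 0 < cs.length := List.length_pos_iff.mpr hne
  simp [List.length_drop]; omega

-- the 'while len(text) > width' loop of splitLine: returns the cut-off pieces and the
-- remainder; 'none' marks the inputs on which Python's loop never terminates
-- (findPrevSpace returned -1, so 'text = text[0:]' leaves text unchanged) — excluded by Pre_.
def whileA (cs : List Char) (width : Int) : Option (List (List Char) × List Char) :=
  if _h : width < (cs.length : Int) then
    if hj : 1 ≤ findPrevSpaceA cs width then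
      match whileA (PySem.List.slice cs (some (findPrevSpaceA cs width + 1)) none) width with
      | some (ls, rem) => some (PySem.List.slice cs none (some (findPrevSpaceA cs width)) :: ls, rem)
      | none => none
    else none
  else some ([], cs)
termination_by cs.length
decreasing_by exact whileA_dec cs width hj

theorem whileA_some_ne_nil_lt (cs : List Char) (w : Int) (ls : List (List Char)) (rem : List Char)
    (h : whileA cs w = some (ls, rem)) (hne : 0 < ls.length) : w < (cs.length : Int) := by
  by_cases hlt : w < (cs.length : Int)
  · exact hlt
  · rw [whileA] at h
    simp [hlt] at h
    rw [h.1] at hne; simp at hne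

theorem splitA_dec (orig : List Char) (width : Int) (ls : List (List Char)) (rem : List Char)
    (h : whileA orig width = some (ls, rem))
    (hc : (rem.length : Int) < PySem.Int.floordiv width 2 ∧ 0 < ls.length) :
    ((orig.length : Int) + 2 -
        (width + (PySem.Int.floordiv (rem.length : Int) (ls.length : Int) + 1))).toNat <
      ((orig.length : Int) + 2 - width).toNat := by
  have h1 : width < (orig.length : Int) := whileA_some_ne_nil_lt orig width ls rem h hc.2
  have h2 : 0 ≤ PySem.Int.floordiv (rem.length : Int) (ls.length : Int) := by
    rw [PySem.Int.floordiv_natCast]; exact Int.natCast_nonneg _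
  omega


def splitA (orig : List Char) (width : Int) : List (List Char) :=
  match h : whileA orig width with
  | none => [orig]   -- Python splitLine diverges on these inputs; excluded by Pre_
  | some (ls, rem) =>
    if hc : (rem.length : Int) < PySem.Int.floordiv width 2 ∧ 0 < ls.length then
      splitA orig (width + (PySem.Int.floordiv (rem.length : Int) (ls.length : Int) + 1))
    else ls ++ [rem]
termination_by ((orig.length : Int) + 2 - width).toNat
decreasing_by exact splitA_dec orig width ls rem h hc

-- one line of reformatText's loop body: the list of output lines it appends to outLines
def procA (line : List Char) (nodeWidth edgeWidth commentWidth : Int) : List (List Char) :=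
  let s := PySem.Chars.strip line
  if PySem.Chars.startswith s "// ".toList then
    match PySem.Chars.splitOn line "// ".toList with
    | [indent, wLine] =>
      (splitA wLine (commentWidth - (indent.length : Int))).foldl
        (fun out each => out ++ [indent ++ "// ".toList ++ each]) []
    | _ => [line]   -- Python raises ValueError (unpack) here; excluded by Pre_
  else if PySem.Chars.startswith s "label = \"".toList then
    match PySem.Chars.splitOn line "label = \"".toList with
    | [indent, wRaw] =>
      let wLine := PySem.List.slice wRaw none (some (-1))
      let wSplit := splitA wLine (PySem.Int.floordiv (wLine.length : Int)
        (-(PySem.Int.floordiv (-(wLine.length : Int)) nodeWidth)))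
      [(PySem.List.slice wSplit (some 1) none).foldl
        (fun acc each => acc ++ "\\n".toList ++ each)
        (indent ++ "label = \"".toList ++ ((PySem.List.pyGet? wSplit 0).getD [])) ++ ['"']]
    | _ => [line]
  else if PySem.Chars.startswith s "xlabel = ".toList then
    match PySem.Chars.splitOn line "xlabel = \"".toList with
    | [indent, wRaw] =>
      let wLine := PySem.List.slice wRaw none (some (-1))
      let wSplit := splitA wLine (PySem.Int.floordiv (wLine.length : Int)
        (-(PySem.Int.floordiv (-(wLine.length : Int)) nodeWidth)))
      [(PySem.List.slice wSplit (some 1) none).foldl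
        (fun acc each => acc ++ "\\n".toList ++ each)
        (indent ++ "xlabel = \"".toList ++ ((PySem.List.pyGet? wSplit 0).getD [])) ++ ['"']]
    | _ => [line]
  else if PySem.Chars.isIn "->".toList s && PySem.Chars.isIn "[xlabel = \"".toList s then
    match PySem.Chars.splitOn line "[xlabel = \"".toList with
    | [edge, wRaw] =>
      let wLine := PySem.List.slice wRaw none (some (-2))
      let wSplit := splitA wLine edgeWidth
      [(PySem.List.slice wSplit (some 1) none).foldl
        (fun acc each => acc ++ "\\n".toList ++ each)
        (edge ++ "[xlabel = \"".toList ++ ((PySem.List.pyGet? wSplit 0).getD [])) ++ "\"]".toList]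
    | _ => [line]
  else [line]
-- note: Python's wSplit[0] raises IndexError on an empty list; splitLine never returns one
-- (splitB_ne_nil below), so '(pyGet? wSplit 0).getD []' is exact.

def reformatText (text : String) (nodeWidth : Int) (edgeWidth : Int) (commentWidth : Int) : String :=
  String.ofList (PySem.Chars.join ['\n']
    ((PySem.Chars.splitOn text.toList ['\n']).foldl
      (fun out line => out ++ procA line nodeWidth edgeWidth commentWidth) []))

-- ===== PORT B =====
-- _cutPoints' inner scan: last relative index i in [1, min(width+1, len-start)) with a space
def lastRelB (cs : List Char) (start width : Int) : Int :=
  (PySem.List.pyRange 1 (min (width + 1) ((cs.length : Int) - start)) 1).foldl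
    (fun last i => if PySem.List.pyGet? cs (start + i) = some ' ' then i else last) (-1)

theorem foldl_pick_mem {p : Int → Prop} [DecidablePred p] (l : List Int) (a : Int) :
    l.foldl (fun last i => if p i then i else last) a = a ∨
    l.foldl (fun last i => if p i then i else last) a ∈ l := by
  induction l generalizing a with
  | nil => left; rfl
  | cons x l ih =>
    rcases ih (if p x then x else a) with h | h
    · rw [List.foldl_cons, h]
      split at h <;> [right; left] <;> simp_all
    · right; exact List.mem_cons_of_mem _ h

theorem lastRelB_bounds (cs : List Char) (s w : Int) (h : 0 ≤ lastRelB cs s w) :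
    1 ≤ lastRelB cs s w ∧ lastRelB cs s w ≤ w ∧ lastRelB cs s w < (cs.length : Int) - s := by
  unfold lastRelB at h ⊢
  rcases foldl_pick_mem (p := fun i => PySem.List.pyGet? cs (s + i) = some ' ')
      (PySem.List.pyRange 1 (min (w + 1) ((cs.length : Int) - s)) 1) (-1) with hh | hh
  · omega
  · rw [PySem.List.mem_pyRange_one] at hh
    omega

theorem cutsB_dec (cs : List Char) (start width : Int) (hr : 0 ≤ lastRelB cs start width) :
    ((cs.length : Int) - (start + lastRelB cs start width + 1)).toNat <
      ((cs.length : Int) - start).toNat := by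
  have := lastRelB_bounds cs start width hr
  omega

-- _cutPoints: the absolute cut indices of the greedy pass
def cutsB (cs : List Char) (width : Int) (start : Int) : List Int :=
  if _h : width < (cs.length : Int) - start then
    if hr : 0 ≤ lastRelB cs start width then
      (start + lastRelB cs start width) :: cutsB cs width (start + lastRelB cs start width + 1)
    else []
  else []
termination_by ((cs.length : Int) - start).toNat
decreasing_by exact cutsB_dec cs start width hr

theorem cutsB_mem (cs : List Char) (w : Int) : ∀ (s : Int) (c : Int), c ∈ cutsB cs w s →
    s < c ∧ c < (cs.length : Int) := by
  intro s c hc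
  fun_induction cutsB cs w s with
  | case1 s h hr ih =>
    have hb := lastRelB_bounds cs s w hr
    rcases List.mem_cons.mp hc with rfl | hmem
    · omega
    · have := ih hmem
      omega
  | case2 => simp at hc
  | case3 => simp at hc

theorem cutsB_ne_nil_lt (cs : List Char) (w s : Int) (h : cutsB cs w s ≠ []) :
    w < (cs.length : Int) - s := by
  by_cases hlt : w < (cs.length : Int) - s
  · exact hlt
  · rw [cutsB] at h; simp [hlt] at h

-- remStart: 'cuts[-1] + 1 if cuts else dflt'  (dflt = 0 at the call site)
def remStartOf (cuts : List Int) (dflt : Int) : Int :=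
  match cuts.getLast? with
  | some c => c + 1
  | none => dflt

theorem remStart_le_len (cs : List Char) (w s : Int) (h0 : 0 ≤ s) (hs : s ≤ (cs.length : Int)) :
    0 ≤ remStartOf (cutsB cs w s) s ∧ remStartOf (cutsB cs w s) s ≤ (cs.length : Int) := by
  unfold remStartOf
  cases hl : (cutsB cs w s).getLast? with
  | none => exact ⟨h0, hs⟩
  | some c =>
    have hmem : c ∈ cutsB cs w s := List.mem_of_getLast? hl
    have := cutsB_mem cs w s c hmem
    show 0 ≤ c + 1 ∧ c + 1 ≤ (cs.length : Int)
    omega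

theorem splitB_dec (text : List Char) (width : Int)
    (hc : cutsB text width 0 ≠ [] ∧
      (text.length : Int) - remStartOf (cutsB text width 0) 0 < PySem.Int.floordiv width 2) :
    ((text.length : Int) + 2 -
        (width + (PySem.Int.floordiv ((text.length : Int) - remStartOf (cutsB text width 0) 0)
          ((cutsB text width 0).length : Int) + 1))).toNat <
      ((text.length : Int) + 2 - width).toNat := by
  have h1 : width < (text.length : Int) := by
    have := cutsB_ne_nil_lt text width 0 hc.1
    omega
  have h2 : 0 ≤ (text.length : Int) - remStartOf (cutsB text width 0) 0 := by
    have := remStart_le_len text width 0 le_rfl (Int.natCast_nonneg _)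
    omega
  have h3 : 0 ≤ PySem.Int.floordiv ((text.length : Int) - remStartOf (cutsB text width 0) 0)
      ((cutsB text width 0).length : Int) := by
    rw [PySem.Int.floordiv_eq_ediv_of_pos (by
      have : 0 < (cutsB text width 0).length := List.length_pos_iff.mpr hc.1
      omega)]
    exact Int.ediv_nonneg h2 (Int.natCast_nonneg _)
  omega

-- B's splitLine: widen-and-retry over the cut indices; pieces sliced out at the end
def splitB (text : List Char) (width : Int) : List (List Char) :=
  let cuts := cutsB text width 0
  let remLen : Int := (text.length : Int) - remStartOf cuts 0
  if hc : cuts ≠ [] ∧ remLen < PySem.Int.floordiv width 2 then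
    splitB text (width + (PySem.Int.floordiv remLen (cuts.length : Int) + 1))
  else
    let fin := cuts.foldl
      (fun acc c => (acc.1 ++ [PySem.List.slice text (some acc.2) (some c)], c + 1))
      (([] : List (List Char)), (0 : Int))
    fin.1 ++ [PySem.List.slice text (some fin.2) none]
termination_by ((text.length : Int) + 2 - width).toNat
decreasing_by exact splitB_dec text width hc

-- the dispatch table: (marker, trailing chars trimmed, closing suffix, fixed width or none)
def specOfB (s : List Char) (edgeWidth : Int) :
    Option (List Char × Int × List Char × Option Int) :=
  if PySem.Chars.startswith s "label = \"".toList then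
    some ("label = \"".toList, 1, ['"'], none)
  else if PySem.Chars.startswith s "xlabel = ".toList then
    some ("xlabel = \"".toList, 1, ['"'], none)
  else if PySem.Chars.isIn "->".toList s && PySem.Chars.isIn "[xlabel = \"".toList s then
    some ("[xlabel = \"".toList, 2, "\"]".toList, some edgeWidth)
  else none

def wrapB (line : List Char) (nodeWidth edgeWidth commentWidth : Int) : List (List Char) :=
  let s := PySem.Chars.strip line
  if PySem.Chars.startswith s "// ".toList then
    -- 'indent, body = line.split("// ")': 2-way unpack via the parts list
    -- (Python raises ValueError when the pattern count differs; excluded by Pre_)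
    let parts := PySem.Chars.splitOn line "// ".toList
    if parts.length = 2 then
      (splitB (parts.getD 1 []) (commentWidth - ((parts.getD 0 []).length : Int))).map
        (fun p => parts.getD 0 [] ++ "// ".toList ++ p)
    else [line]
  else
    match specOfB s edgeWidth with
    | none => [line]
    | some (marker, trim, suffix, w?) =>
      let parts := PySem.Chars.splitOn line marker
      if parts.length = 2 then
        let body := PySem.List.slice (parts.getD 1 []) none (some (-trim))
        let w := w?.getD (PySem.Int.floordiv (body.length : Int)
          (-(PySem.Int.floordiv (-(body.length : Int)) nodeWidth)))
        [parts.getD 0 [] ++ marker ++ PySem.Chars.join "\\n".toList (splitB body w) ++ suffix]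
      else [line]

def reformatText_alt (text : String) (nodeWidth : Int) (edgeWidth : Int) (commentWidth : Int) : String :=
  String.ofList (PySem.Chars.join ['\n']
    ((PySem.Chars.splitOn text.toList ['\n']).flatMap
      (fun line => wrapB line nodeWidth edgeWidth commentWidth)))

-- ===== PRECONDITION & SPEC =====
-- pvOkW t w: every window of w consecutive characters of t starting at position ≥ 1 contains
-- a space — a checkable condition under which splitLine always finds a cut point.
def pvOkW (t : List Char) (w : Int) : Bool :=
  (List.range t.length).all fun i =>
    i == 0 || decide ((t.length : Int) < (i : Int) + w) || ((t.drop i).take w.toNat).contains ' '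

def pvSplitOK (t : List Char) (w : Int) : Bool := decide (1 ≤ w) && pvOkW t w

-- Pre_ excludes: lines where the pattern occurs more than once (Python's 2-variable unpack
-- raises ValueError), empty label bodies or nodeWidth ≤ 0 (ZeroDivisionError in
-- len(wLine)//ceil(len(wLine)/nodeWidth)), and wrap widths < 1 or texts with a width-long
-- space-free window, on which splitLine can loop forever.  The window condition is
-- sufficient but slightly stronger than A's exact termination behaviour, so a few inputs
-- on which A returns (with B agreeing) are excluded — see the cites in claim.json.
def pvLineOK (line : List Char) (nodeWidth edgeWidth commentWidth : Int) : Bool :=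
  if PySem.Chars.startswith (PySem.Chars.strip line) "// ".toList then
    let parts := PySem.Chars.splitOn line "// ".toList
    parts.length == 2 &&
      pvSplitOK (parts.getD 1 []) (commentWidth - ((parts.getD 0 []).length : Int))
  else if PySem.Chars.startswith (PySem.Chars.strip line) "label = \"".toList then
    let parts := PySem.Chars.splitOn line "label = \"".toList
    let b := PySem.List.slice (parts.getD 1 []) none (some (-1))
    parts.length == 2 && !b.isEmpty && decide (1 ≤ nodeWidth) &&
      pvSplitOK b (PySem.Int.floordiv (b.length : Int)
        (-(PySem.Int.floordiv (-(b.length : Int)) nodeWidth)))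
  else if PySem.Chars.startswith (PySem.Chars.strip line) "xlabel = ".toList then
    let parts := PySem.Chars.splitOn line "xlabel = \"".toList
    let b := PySem.List.slice (parts.getD 1 []) none (some (-1))
    parts.length == 2 && !b.isEmpty && decide (1 ≤ nodeWidth) &&
      pvSplitOK b (PySem.Int.floordiv (b.length : Int)
        (-(PySem.Int.floordiv (-(b.length : Int)) nodeWidth)))
  else if PySem.Chars.isIn "->".toList (PySem.Chars.strip line) &&
          PySem.Chars.isIn "[xlabel = \"".toList (PySem.Chars.strip line) then
    let parts := PySem.Chars.splitOn line "[xlabel = \"".toList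
    parts.length == 2 &&
      pvSplitOK (PySem.List.slice (parts.getD 1 []) none (some (-2))) edgeWidth
  else true

def Pre_reformatText (text : String) (nodeWidth : Int) (edgeWidth : Int) (commentWidth : Int) : Prop :=
  ∀ line ∈ PySem.Chars.splitOn text.toList ['\n'], pvLineOK line nodeWidth edgeWidth commentWidth = true

instance (text : String) (nodeWidth : Int) (edgeWidth : Int) (commentWidth : Int) :
    Decidable (Pre_reformatText text nodeWidth edgeWidth commentWidth) := by
  unfold Pre_reformatText; infer_instance

def pvWitness_reformatText : String × Int × Int × Int := ("hi", 5, 5, 8)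

def Spec_reformatText (text : String) (nodeWidth : Int) (edgeWidth : Int) (commentWidth : Int) (out : String) : Prop := out = reformatText_alt text nodeWidth edgeWidth commentWidth
instance (text : String) (nodeWidth : Int) (edgeWidth : Int) (commentWidth : Int) (out : String) : Decidable (Spec_reformatText text nodeWidth edgeWidth commentWidth out) := by unfold Spec_reformatText; infer_instance

-- ===== CLAIM (what is proved, stated in full; the proofs are below) =====
def Claim_equal_reformatText : Prop := ∀ (text : String) (nodeWidth : Int) (edgeWidth : Int) (commentWidth : Int), Dom_reformatText text nodeWidth edgeWidth commentWidth → Pre_reformatText text nodeWidth edgeWidth commentWidth → Spec_reformatText text nodeWidth edgeWidth commentWidth (reformatText text nodeWidth edgeWidth commentWidth)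

-- ===== LEMMAS AND PROOFS =====

-- unbounded form of pvOkW, convenient for induction
def pvOkWP (t : List Char) (w : Int) : Prop :=
  ∀ i : Nat, 1 ≤ i → (i : Int) + w ≤ (t.length : Int) → ' ' ∈ (t.drop i).take w.toNat

theorem okW_to_WP (t : List Char) (w : Int) (hw : 1 ≤ w) (h : pvOkW t w = true) : pvOkWP t w := by
  intro i h1 h2
  have hi : i ∈ List.range t.length := by rw [List.mem_range]; omega
  have := (List.all_eq_true.mp h) i hi
  simp only [Bool.or_eq_true, beq_iff_eq, decide_eq_true_eq, List.contains_eq_mem,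
    decide_eq_true_eq] at this
  rcases this with (h0 | hgt) | hmem
  · omega
  · omega
  · exact hmem

theorem okWP_drop (t : List Char) (w : Int) (k : Nat) (hw : 1 ≤ w) (h : pvOkWP t w) :
    pvOkWP (t.drop k) w := by
  intro i h1 h2
  simp only [List.length_drop] at h2
  have hkl : k ≤ t.length := by omega
  have := h (k + i) (by omega) (by push_cast; omega)
  rwa [List.drop_drop]

theorem okWP_mono (t : List Char) (w w' : Int) (hww : w ≤ w') (hw : 0 ≤ w) (h : pvOkWP t w) :
    pvOkWP t w' := by
  intro i h1 h2
  have := h i h1 (by omega)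
  have hsub : (t.drop i).take w.toNat = ((t.drop i).take w'.toNat).take w.toNat := by
    rw [List.take_take, min_eq_left (by omega)]
  rw [hsub] at this
  exact List.mem_of_mem_take this

theorem pyGet?_space_lt (cs : List Char) (j : Int) (h0 : 0 ≤ j)
    (h : PySem.List.pyGet? cs j = some ' ') : j < (cs.length : Int) := by
  have h' : PySem.List.pyGet? cs ((j.toNat : Nat) : Int) = some ' ' := by
    rwa [Int.toNat_of_nonneg h0]
  rw [PySem.List.pyGet?_natCast] at h'
  obtain ⟨hlt, -⟩ := List.getElem?_eq_some_iff.mp h'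
  omega

theorem fpsA_cases (cs : List Char) (n : Nat) :
    fpsA cs n = -1 ∨ (1 ≤ fpsA cs n ∧ fpsA cs n ≤ (n : Int) ∧
      PySem.List.pyGet? cs (fpsA cs n) = some ' ') := by
  induction n with
  | zero => left; rfl
  | succ n ih =>
    rw [show fpsA cs (n+1) = if PySem.List.pyGet? cs ((n : Int)+1) = some ' '
        then ((n : Int)+1) else fpsA cs n from rfl]
    split
    · right
      refine ⟨by omega, by push_cast; omega, by assumption⟩
    · rcases ih with h | ⟨ha, hb, hc⟩
      · left; exact h
      · right; exact ⟨ha, by push_cast; omega, hc⟩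

theorem fpsA_find (cs : List Char) (n : Nat) (j : Int) (h1 : 1 ≤ j) (h2 : j ≤ (n : Int))
    (h3 : PySem.List.pyGet? cs j = some ' ') : 1 ≤ fpsA cs n := by
  induction n with
  | zero => omega
  | succ n ih =>
    rw [show fpsA cs (n+1) = if PySem.List.pyGet? cs ((n : Int)+1) = some ' '
        then ((n : Int)+1) else fpsA cs n from rfl]
    split
    · omega
    · rename_i hne
      by_cases hj : j = (n : Int) + 1
      · rw [hj] at h3; exact absurd h3 hne
      · exact ih (by push_cast at h2 ⊢; omega)

theorem pyGet?_drop_offset (cs : List Char) (s : Nat) (i : Int) (hi : 0 ≤ i) :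
    PySem.List.pyGet? cs ((s : Int) + i) = PySem.List.pyGet? (cs.drop s) i := by
  rw [PySem.List.pyGet?_of_nonneg cs (by omega), PySem.List.pyGet?_of_nonneg _ hi,
    List.getElem?_drop]
  congr 1
  omega

theorem foldl_range_eq_fpsA_off (cs : List Char) (s : Nat) (n : Nat) :
    (PySem.List.pyRange 1 ((n : Int) + 1) 1).foldl
      (fun last i => if PySem.List.pyGet? cs ((s : Int) + i) = some ' ' then i else last) (-1) =
    fpsA (cs.drop s) n := by
  induction n with
  | zero => rw [PySem.List.pyRange_one_eq_nil (by omega)]; rfl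
  | succ n ih =>
    have hc : ((n + 1 : Nat) : Int) + 1 = ((n : Int) + 1) + 1 := by push_cast; ring
    rw [hc, PySem.List.pyRange_one_succ_right (by omega), List.foldl_append]
    simp only [List.foldl_cons, List.foldl_nil, ih]
    rw [pyGet?_drop_offset cs s ((n : Int) + 1) (by omega)]
    rw [show fpsA (cs.drop s) (n+1) = if PySem.List.pyGet? (cs.drop s) ((n : Int)+1) = some ' '
        then ((n : Int)+1) else fpsA (cs.drop s) n from rfl]

theorem lastRelB_eq (cs : List Char) (s : Nat) (w : Int) (hw : 1 ≤ w) (hs : s ≤ cs.length)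
    (h : w < (cs.length : Int) - s) : lastRelB cs s w = fpsA (cs.drop s) w.toNat := by
  obtain ⟨n, rfl⟩ : ∃ n : Nat, w = (n : Int) := ⟨w.toNat, (Int.toNat_of_nonneg (by omega)).symm⟩
  unfold lastRelB
  rw [min_eq_left (by omega), foldl_range_eq_fpsA_off]
  simp

theorem remStart_cons (c : Int) (t : List Int) (d : Int) :
    remStartOf (c :: t) d = remStartOf t (c + 1) := by
  cases t with
  | nil => rfl
  | cons x xs =>
    unfold remStartOf
    rw [List.getLast?_cons_cons]
    cases hl : (x :: xs).getLast? with
    | none => simp at hl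
    | some y => rfl

-- the main correspondence: cutsB's indices describe exactly whileA's pieces
theorem cuts_eq (N : Nat) : ∀ (cs : List Char) (w : Int) (s : Nat), s ≤ cs.length →
    cs.length - s ≤ N → 1 ≤ w → pvOkWP (cs.drop s) w →
    ∃ (ls : List (List Char)) (rem : List Char) (s' : Nat), whileA (cs.drop s) w = some (ls, rem) ∧ s' ≤ cs.length ∧
      rem = cs.drop s' ∧
      (cutsB cs w s).length = ls.length ∧
      remStartOf (cutsB cs w s) (s : Int) = (s' : Int) ∧
      ∀ acc : List (List Char), (cutsB cs w s).foldl
        (fun a c => (a.1 ++ [PySem.List.slice cs (some a.2) (some c)], c + 1)) (acc, (s : Int)) =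
        (acc ++ ls, (s' : Int)) := by
  induction N with
  | zero =>
    intro cs w s hs hN hw _hok
    have hge : ¬ w < (cs.length : Int) - (s : Int) := by omega
    have hcuts : cutsB cs w s = [] := by rw [cutsB]; simp [hge]
    have hwA : whileA (cs.drop s) w = some ([], cs.drop s) := by
      rw [whileA, dif_neg (by simp only [List.length_drop]; omega)]
    exact ⟨[], cs.drop s, s, hwA, hs, rfl, by simp [hcuts], by simp [hcuts, remStartOf],
      fun acc => by simp [hcuts]⟩
  | succ N ih =>
    intro cs w s hs hN hw hok
    by_cases hlt : w < (cs.length : Int) - (s : Int)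
    · set t := cs.drop s with ht
      have htl : t.length = cs.length - s := by simp [ht]
      have hltt : w < (t.length : Int) := by push_cast [htl]; omega
      -- there is a space in positions 1..w of t
      have hwin := hok 1 le_rfl (by push_cast [htl]; omega)
      obtain ⟨m, hmw, hme⟩ : ∃ m, m < w.toNat ∧ (t.drop 1)[m]? = some ' ' := by
        obtain ⟨m, hm, he⟩ := List.getElem_of_mem hwin
        simp only [List.length_take, lt_min_iff] at hm
        exact ⟨m, hm.1, by
          rw [List.getElem?_eq_some_iff]
          exact ⟨hm.2, by rw [← List.getElem_take (j := w.toNat)]; exact he⟩⟩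
      have hj3 : PySem.List.pyGet? t ((1 + m : Nat) : Int) = some ' ' := by
        rw [PySem.List.pyGet?_natCast]
        rw [List.getElem?_eq_some_iff] at hme ⊢
        obtain ⟨hm1, hm2⟩ := hme
        simp only [List.length_drop] at hm1
        exact ⟨by omega, by rw [← List.getElem_drop (i := 1)]; exact hm2⟩
      have hfind : 1 ≤ fpsA t w.toNat :=
        fpsA_find t w.toNat ((1 + m : Nat) : Int) (by push_cast; omega)
          (by push_cast; omega) hj3
      rcases fpsA_cases t w.toNat with hcase | ⟨-, hjw, hsp⟩
      · omega
      · set j := fpsA t w.toNat with hjdef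
        have hjlt : j < (t.length : Int) := pyGet?_space_lt t j (by omega) hsp
        set s₂ : Nat := s + j.toNat + 1 with hs₂
        have hs₂le : s₂ ≤ cs.length := by push_cast [htl] at hjlt; omega
        have hdrop₂ : cs.drop s₂ = t.drop (j.toNat + 1) := by
          rw [ht, List.drop_drop]
          try congr 1
          try omega
        have hok₂ : pvOkWP (cs.drop s₂) w := by
          rw [hdrop₂]; exact okWP_drop t w (j.toNat + 1) hw hok
        obtain ⟨ls', rem, s', hA', hs'le, hrem, hlen', hrs', hfold'⟩ :=
          ih cs w s₂ hs₂le (by omega) hw hok₂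
        have hslice : PySem.List.slice t (some (j + 1)) none = cs.drop s₂ := by
          rw [PySem.List.slice_from _ (by omega), hdrop₂]
          congr 1; omega
        have hfA : findPrevSpaceA t w = j := by
          unfold findPrevSpaceA; exact hjdef.symm
        have hwA : whileA t w = some (PySem.List.slice t none (some j) :: ls', rem) := by
          rw [whileA, dif_pos hltt, hfA, dif_pos (show (1:Int) ≤ j by omega), hslice, hA']
        have hrelB : lastRelB cs (s : Int) w = j := by
          rw [lastRelB_eq cs s w hw hs hlt, ← ht, ← hjdef]
        have hs₂c : (s : Int) + j + 1 = (s₂ : Int) := by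
          push_cast [hs₂]; omega
        have hcutsB : cutsB cs w s = ((s : Int) + j) :: cutsB cs w s₂ := by
          rw [cutsB, dif_pos hlt, hrelB, dif_pos (by omega : (0:Int) ≤ j), hs₂c]
        have hpiece : PySem.List.slice cs (some (s : Int)) (some ((s : Int) + j)) =
            PySem.List.slice t none (some j) := by
          rw [PySem.List.slice_to _ (by omega), ht]
          have hcast : (s : Int) + j = ((s + j.toNat : Nat) : Int) := by push_cast; omega
          rw [hcast, PySem.List.slice_natCast]
          congr 1; omega
        refine ⟨PySem.List.slice t none (some j) :: ls', rem, s', hwA, hs'le, hrem,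
          by simp [hcutsB, hlen'], ?_, ?_⟩
        · rw [hcutsB, remStart_cons, hs₂c, hrs']
        · intro acc
          rw [hcutsB, List.foldl_cons]
          simp only [hpiece, hs₂c]
          rw [hfold' (acc ++ [PySem.List.slice t none (some j)])]
          simp
    · have hcuts : cutsB cs w s = [] := by rw [cutsB]; simp [hlt]
      have hwA : whileA (cs.drop s) w = some ([], cs.drop s) := by
        rw [whileA, dif_neg (by simp only [List.length_drop]; omega)]
      exact ⟨[], cs.drop s, s, hwA, hs, rfl, by simp [hcuts], by simp [hcuts, remStartOf],
        fun acc => by simp [hcuts]⟩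

theorem splitA_step (orig : List Char) (w : Int) (ls : List (List Char)) (rem : List Char)
    (h : whileA orig w = some (ls, rem)) :
    splitA orig w =
      if (rem.length : Int) < PySem.Int.floordiv w 2 ∧ 0 < ls.length then
        splitA orig (w + (PySem.Int.floordiv (rem.length : Int) (ls.length : Int) + 1))
      else ls ++ [rem] := by
  rw [splitA.eq_def]
  split
  · rename_i heq; rw [h] at heq; cases heq
  · rename_i ls' rem' heq
    rw [h] at heq
    cases heq
    by_cases hc : (rem.length : Int) < PySem.Int.floordiv w 2 ∧ 0 < ls.length
    · rw [dif_pos hc, if_pos hc]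
    · rw [dif_neg hc, if_neg hc]

theorem split_eq (M : Nat) : ∀ (orig : List Char) (w : Int),
    (((orig.length : Int) + 2 - w).toNat ≤ M) → 1 ≤ w → pvOkWP orig w →
    splitA orig w = splitB orig w := by
  induction M with
  | zero =>
    intro orig w hM hw hok
    have hge : ¬ w < (orig.length : Int) := by omega
    have hA : whileA orig w = some ([], orig) := by rw [whileA, dif_neg hge]
    have hcuts : cutsB orig w 0 = [] := by
      rw [cutsB, dif_neg (by omega)]
    rw [splitA_step orig w [] orig hA, if_neg (by simp), splitB]
    simp [hcuts, remStartOf, PySem.List.slice_none_none]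
  | succ M ih =>
    intro orig w hM hw hok
    obtain ⟨ls, rem, s', hA, hs', hrem, hlen, hrs, hfold⟩ :=
      cuts_eq orig.length orig w 0 (Nat.zero_le _) le_rfl hw (by simpa using hok)
    simp only [List.drop_zero] at hA
    simp only [Nat.cast_zero] at hlen hrs hfold
    have hrs0 : remStartOf (cutsB orig w 0) 0 = (s' : Int) := hrs
    have hremlen : (orig.length : Int) - remStartOf (cutsB orig w 0) 0 = (rem.length : Int) := by
      rw [hrs0, hrem]
      simp only [List.length_drop]
      omega
    rw [splitA_step orig w ls rem hA, splitB]
    have hcne : (cutsB orig w 0 ≠ [] ↔ 0 < ls.length) := by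
      rw [← List.length_pos_iff, hlen]
    by_cases hc : (rem.length : Int) < PySem.Int.floordiv w 2 ∧ 0 < ls.length
    · rw [if_pos hc, dif_pos (by rw [hremlen]; exact ⟨hcne.mpr hc.2, hc.1⟩)]
      rw [hremlen, hlen]
      have hwlt : w < (orig.length : Int) := whileA_some_ne_nil_lt orig w ls rem hA hc.2
      have hq : 0 ≤ PySem.Int.floordiv (rem.length : Int) (ls.length : Int) := by
        rw [PySem.Int.floordiv_natCast]; exact Int.natCast_nonneg _
      exact ih orig _ (by omega) (by omega) (okWP_mono orig w _ (by omega) (by omega) hok)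
    · rw [if_neg hc, dif_neg (by rw [hremlen]; intro ⟨h1, h2⟩; exact hc ⟨h2, hcne.mp h1⟩)]
      rw [hfold [], hrem, List.nil_append]
      show ls ++ [List.drop s' orig] = ls ++ [PySem.List.slice orig (some ((s' : Nat) : Int)) none]
      rw [PySem.List.slice_from_natCast]

theorem splitB_ne_nil (orig : List Char) (w : Int) : splitB orig w ≠ [] := by
  fun_induction splitB <;> simp_all

theorem foldl_join (sep : List Char) (t : List (List Char)) : ∀ (hd pre : List Char),
    t.foldl (fun acc e => acc ++ sep ++ e) (pre ++ hd) = pre ++ PySem.Chars.join sep (hd :: t) := by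
  induction t with
  | nil => intro hd pre; rw [PySem.Chars.join_singleton]; rfl
  | cons e t ih =>
    intro hd pre
    rw [List.foldl_cons]
    have hr : (pre ++ hd) ++ sep ++ e = (pre ++ hd ++ sep) ++ e := by
      simp [List.append_assoc]
    rw [hr, ih e (pre ++ hd ++ sep), PySem.Chars.join_cons_cons]
    simp [List.append_assoc]

-- the label/xlabel/edge assembly: A's head-plus-fold equals B's join
theorem assemble_eq (pre : List Char) (body : List Char) (w : Int)
    (hw : 1 ≤ w) (hok : pvOkW body w = true) :
    (PySem.List.slice (splitA body w) (some 1) none).foldl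
      (fun acc each => acc ++ "\\n".toList ++ each)
      (pre ++ ((PySem.List.pyGet? (splitA body w) 0).getD [])) =
    pre ++ PySem.Chars.join "\\n".toList (splitB body w) := by
  rw [split_eq (((body.length : Int) + 2 - w).toNat) body w le_rfl hw (okW_to_WP body w hw hok)]
  obtain ⟨hd, tl, hcons⟩ := List.exists_cons_of_ne_nil (splitB_ne_nil body w)
  rw [hcons, PySem.List.slice_from_one, List.tail_cons]
  have h0 : (PySem.List.pyGet? (hd :: tl) 0).getD [] = hd := by
    simp [PySem.List.pyGet?, PySem.List.pyIdx?]
  rw [h0, foldl_join]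

theorem wrap_eq (line : List Char) (nW eW cW : Int) (h : pvLineOK line nW eW cW = true) :
    procA line nW eW cW = wrapB line nW eW cW := by
  unfold pvLineOK at h
  unfold procA wrapB
  by_cases h1 : PySem.Chars.startswith (PySem.Chars.strip line) "// ".toList = true
  · rw [if_pos h1] at h
    rw [if_pos h1, if_pos h1]
    simp only [Bool.and_eq_true, beq_iff_eq] at h
    obtain ⟨hlen2, hsk⟩ := h
    obtain ⟨a, b, hab⟩ := List.length_eq_two.mp hlen2
    unfold pvSplitOK at hsk
    rw [hab] at hsk
    simp only [List.getD_cons_zero, List.getD_cons_succ, Bool.and_eq_true,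
      decide_eq_true_eq] at hsk
    obtain ⟨hw1, hokw⟩ := hsk
    simp only [hab]
    rw [split_eq (((b.length : Int) + 2 - (cW - (a.length : Int))).toNat) b _ le_rfl hw1
      (okW_to_WP b _ hw1 hokw)]
    rw [PySem.List.foldl_append_singleton_eq_map]
    simp [List.append_assoc]
  · rw [if_neg h1] at h
    rw [if_neg h1, if_neg h1]
    by_cases h2 : PySem.Chars.startswith (PySem.Chars.strip line) "label = \"".toList = true
    · rw [if_pos h2] at h
      rw [if_pos h2]
      have hspec : specOfB (PySem.Chars.strip line) eW =
          some ("label = \"".toList, 1, ['"'], (none : Option Int)) := by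
        unfold specOfB; rw [if_pos h2]
      rw [hspec]
      simp only [Bool.and_eq_true, beq_iff_eq, decide_eq_true_eq] at h
      obtain ⟨⟨⟨hlen2, hne⟩, hnw⟩, hsk⟩ := h
      obtain ⟨a, b, hab⟩ := List.length_eq_two.mp hlen2
      unfold pvSplitOK at hsk
      rw [hab] at hsk
      simp only [List.getD_cons_zero, List.getD_cons_succ, Bool.and_eq_true,
        decide_eq_true_eq] at hsk
      obtain ⟨hw1, hokw⟩ := hsk
      simp only [hab]
      rw [assemble_eq (a ++ "label = \"".toList) (PySem.List.slice b none (some (-1))) _ hw1 hokw]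
      simp [List.append_assoc]
    · rw [if_neg h2] at h
      rw [if_neg h2]
      by_cases h3 : PySem.Chars.startswith (PySem.Chars.strip line) "xlabel = ".toList = true
      · rw [if_pos h3] at h
        rw [if_pos h3]
        have hspec : specOfB (PySem.Chars.strip line) eW =
            some ("xlabel = \"".toList, 1, ['"'], (none : Option Int)) := by
          unfold specOfB; rw [if_neg h2, if_pos h3]
        rw [hspec]
        simp only [Bool.and_eq_true, beq_iff_eq, decide_eq_true_eq] at h
        obtain ⟨⟨⟨hlen2, hne⟩, hnw⟩, hsk⟩ := h
        obtain ⟨a, b, hab⟩ := List.length_eq_two.mp hlen2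
        unfold pvSplitOK at hsk
        rw [hab] at hsk
        simp only [List.getD_cons_zero, List.getD_cons_succ, Bool.and_eq_true,
          decide_eq_true_eq] at hsk
        obtain ⟨hw1, hokw⟩ := hsk
        simp only [hab]
        rw [assemble_eq (a ++ "xlabel = \"".toList) (PySem.List.slice b none (some (-1))) _ hw1 hokw]
        simp [List.append_assoc]
      · rw [if_neg h3] at h
        rw [if_neg h3]
        by_cases h4 : (PySem.Chars.isIn "->".toList (PySem.Chars.strip line) &&
            PySem.Chars.isIn "[xlabel = \"".toList (PySem.Chars.strip line)) = true
        · rw [if_pos h4] at h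
          rw [if_pos h4]
          have hspec : specOfB (PySem.Chars.strip line) eW =
              some ("[xlabel = \"".toList, 2, "\"]".toList, some eW) := by
            unfold specOfB; rw [if_neg h2, if_neg h3, if_pos h4]
          rw [hspec]
          simp only [Bool.and_eq_true, beq_iff_eq] at h
          obtain ⟨hlen2, hsk⟩ := h
          obtain ⟨a, b, hab⟩ := List.length_eq_two.mp hlen2
          unfold pvSplitOK at hsk
          rw [hab] at hsk
          simp only [List.getD_cons_zero, List.getD_cons_succ, Bool.and_eq_true,
            decide_eq_true_eq] at hsk
          obtain ⟨hw1, hokw⟩ := hsk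
          simp only [hab]
          rw [assemble_eq (a ++ "[xlabel = \"".toList) (PySem.List.slice b none (some (-2))) _ hw1 hokw]
          simp [List.append_assoc]
        · rw [if_neg h4]
          have hspec : specOfB (PySem.Chars.strip line) eW = none := by
            unfold specOfB; rw [if_neg h2, if_neg h3, if_neg h4]
          rw [hspec]

-- ===== VERDICT (by name: the statement is the Claim_ definition above) =====
theorem reformatText_spec : Claim_equal_reformatText := by
  intro text nW eW cW _hdom hpre
  show reformatText text nW eW cW = reformatText_alt text nW eW cW
  unfold reformatText reformatText_alt
  rw [PySem.List.foldl_append_eq_flatMap]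
  simp only [List.nil_append]
  congr 2
  exact List.flatMap_congr (fun line hline => wrap_eq line nW eW cW (hpre line hline))
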